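-- pv_equiv track=rewrite | github.com/vishal1565/Codechef | DPS.py | checkDPS
-- ===== SOURCE A (Python) =====
-- from collections import Counter
--
-- def checkDPS(st):
--     even, odd = 0, 0
--     c = Counter(st)
--     for i in c.keys():
--         if c[i]%2 == 0:even += 1
--         else: odd += 1
--     if len(st)%2 == 0:
--         if odd == 2:
--             return 'DPS'
--         else: return '!DPS'
--     else:
--         if odd == 0 or odd == 1 or odd == 3:
--             return 'DPS'
--         else:
--             return '!DPS'
-- ===== SOURCE B (Python) =====
-- def _oddRuns(s):
--     if not s:
--         return 0
--     k = 1
--     while k < len(s) and s[k] == s[0]: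
--         k += 1
--     return k % 2 + _oddRuns(s[k:])
--
--
-- def checkDPS(st):
--     odd = _oddRuns(sorted(st))
--     if len(st) % 2 == 0:
--         return 'DPS' if odd == 2 else '!DPS'
--     return 'DPS' if odd in (0, 1, 3) else '!DPS'
-- ===== Notes on version B (the rewrite author's own statement) =====
-- stated objective: alternative
-- what changed: B uses no frequency map at all: it sorts the characters and counts odd-length runs of equal adjacent characters with a recursive run-length scan, instead of building a Counter and looping over its keys.
import Mathlib
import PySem

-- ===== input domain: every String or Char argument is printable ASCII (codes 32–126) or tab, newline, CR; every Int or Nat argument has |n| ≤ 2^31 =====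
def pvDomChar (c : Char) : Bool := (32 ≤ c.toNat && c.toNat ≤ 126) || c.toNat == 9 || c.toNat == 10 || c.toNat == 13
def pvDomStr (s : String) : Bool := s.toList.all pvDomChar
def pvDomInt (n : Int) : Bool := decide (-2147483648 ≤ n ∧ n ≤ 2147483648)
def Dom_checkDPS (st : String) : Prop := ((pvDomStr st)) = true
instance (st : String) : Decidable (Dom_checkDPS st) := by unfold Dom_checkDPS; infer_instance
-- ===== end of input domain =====

-- B drops the frequency map entirely: it sorts the characters and counts odd-length runs
-- of equal adjacent characters (alternative algorithm, same result).

-- ===== PORT A =====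
-- c[i] for i in c.keys() never raises, so it is ported as getD with default 0.
def checkDPS (st : String) : String :=
  let c := PySem.Dict.counter (st.toList)
  let eo := c.keys.foldl
    (fun (eo : Int × Int) i =>
      if PySem.Int.mod (c.getD i 0) 2 == 0 then (eo.1 + 1, eo.2) else (eo.1, eo.2 + 1))
    ((0 : Int), (0 : Int))
  if PySem.Int.mod (PySem.Str.len st) 2 == 0 then
    if eo.2 == 2 then "DPS" else "!DPS"
  else
    if eo.2 == 0 || eo.2 == 1 || eo.2 == 3 then "DPS" else "!DPS"

-- ===== PORT B =====
-- _oddRuns: the inner while loop advancing k over the run of s[0] is the takeWhile prefix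
-- (k = 1 + its length), and s[k:] is the dropWhile suffix; recursion as in Source B.
def pvOddRuns : List Char → Int
  | [] => 0
  | a :: t =>
    PySem.Int.mod (1 + (t.takeWhile (fun c => c == a)).length) 2
      + pvOddRuns (t.dropWhile (fun c => c == a))
termination_by l => l.length
decreasing_by
  simpa using Nat.lt_succ_of_le (List.Sublist.length_le (List.dropWhile_sublist _))

def checkDPS_alt (st : String) : String :=
  let odd := pvOddRuns (PySem.List.sorted st.toList (fun x => x) false)
  if PySem.Int.mod (PySem.Str.len st) 2 == 0 then
    if odd == 2 then "DPS" else "!DPS"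
  else
    if odd == 0 || odd == 1 || odd == 3 then "DPS" else "!DPS"

-- ===== PRECONDITION & SPEC =====
def Spec_checkDPS (st : String) (out : String) : Prop := out = checkDPS_alt st
instance (st : String) (out : String) : Decidable (Spec_checkDPS st out) := by unfold Spec_checkDPS; infer_instance

-- ===== CLAIM (what is proved, stated in full; the proofs are below) =====
def Claim_equal_checkDPS : Prop := ∀ (st : String), Dom_checkDPS st → Spec_checkDPS st (checkDPS st)

-- ===== LEMMAS AND PROOFS =====

-- A's key loop: the second component counts the keys with odd count.
theorem pv_fold_odd (keys : List Char) (f : Char → Bool) (p : Int × Int) :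
    (keys.foldl (fun (eo : Int × Int) i =>
      if f i then (eo.1 + 1, eo.2) else (eo.1, eo.2 + 1)) p).2
    = p.2 + ((keys.filter (fun i => !f i)).length : Int) := by
  induction keys generalizing p with
  | nil => simp
  | cons a t ih =>
    simp only [List.foldl_cons, List.filter_cons]
    by_cases h : f a = true
    · simp [h, ih]
    · simp [h, ih]; omega

theorem pv_scan_sorted (l : List Char) (h : l.Pairwise (· ≤ ·)) :
    pvOddRuns l
    = (((l.dedup).filter (fun x => decide (l.count x % 2 = 1))).length : Int) := by
  induction l using pvOddRuns.induct with
  | case1 => simp [pvOddRuns]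
  | case2 a t ih =>
    rw [List.pairwise_cons] at h
    obtain ⟨ha, ht⟩ := h
    set tw := t.takeWhile (fun c => c == a) with htw
    set dw := t.dropWhile (fun c => c == a) with hdw
    have htdw : tw ++ dw = t := List.takeWhile_append_dropWhile
    have htwa : ∀ x ∈ tw, x = a := by
      intro x hx
      have := List.mem_takeWhile_imp hx
      simpa using this
    -- a ∉ dw
    have hadw : a ∉ dw := by
      intro hmem
      cases hdwc : dw with
      | nil => rw [hdwc] at hmem; simp at hmem
      | cons b r =>
        have hb : ¬ (b == a) = true := by
          have := List.head_dropWhile_not (fun c => c == a) (l := t) (by rw [← hdw, hdwc]; simp)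
          simpa [← hdw, hdwc] using this
        have hble : a ≤ b := ha b (by rw [← htdw]; exact List.mem_append_right _ (by simp [hdwc]))
        have hdwp : dw.Pairwise (· ≤ ·) := List.Pairwise.sublist (List.dropWhile_sublist _) ht
        rw [hdwc] at hmem hdwp
        rcases List.mem_cons.mp hmem with rfl | hr
        · exact hb (by simp)
        · have : b ≤ a := (List.pairwise_cons.mp hdwp).1 a hr
          have : b = a := le_antisymm this hble
          exact hb (by simp [this])
    have hcount_a : (a :: t).count a = 1 + tw.length := by
      rw [← htdw]
      have h1 : tw.count a = tw.length := List.count_eq_length.mpr (fun b hb => by simp [htwa b hb])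
      simp [List.count_append, List.count_eq_zero_of_not_mem hadw, h1, Nat.add_comm]
    have hcount_ne : ∀ x, x ≠ a → (a :: t).count x = dw.count x := by
      intro x hx
      rw [← htdw]
      have : tw.count x = 0 := List.count_eq_zero_of_not_mem (fun hm => hx (htwa x hm))
      simp [List.count_append, this, Ne.symm hx]
    have hdwpair : dw.Pairwise (· ≤ ·) := List.Pairwise.sublist (List.dropWhile_sublist _) ht
    rw [pvOddRuns, ih hdwpair]
    -- perm of the filtered dedups
    have hperm : ((a :: t).dedup.filter (fun x => decide ((a :: t).count x % 2 = 1))).Perm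
        ((if (a :: t).count a % 2 = 1 then [a] else []) ++
          dw.dedup.filter (fun x => decide (dw.count x % 2 = 1))) := by
      apply (List.perm_ext_iff_of_nodup (List.Nodup.filter _ (List.nodup_dedup _)) ?_).mpr
      · intro x
        simp only [List.mem_filter, List.mem_dedup, List.mem_append, List.mem_cons,
          decide_eq_true_eq]
        constructor
        · rintro ⟨hx, hodd⟩
          by_cases hxa : x = a
          · subst hxa; left; simp at hodd; simp [hodd]
          · right
            rcases hx with rfl | hxt
            · exact absurd rfl hxa
            · have hxdw : x ∈ dw := by
                rw [← htdw] at hxt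
                rcases List.mem_append.mp hxt with hm | hm
                · exact absurd (htwa x hm) hxa
                · exact hm
              exact ⟨hxdw, by rwa [← hcount_ne x hxa]⟩
        · rintro (hx | ⟨hxdw, hodd⟩)
          · split at hx <;> simp_all
          · have hxa : x ≠ a := fun hh => hadw (hh ▸ hxdw)
            refine ⟨Or.inr ?_, by rwa [hcount_ne x hxa]⟩
            rw [← htdw]; exact List.mem_append_right _ hxdw
      · refine List.Nodup.append ?_ (List.Nodup.filter _ (List.nodup_dedup _)) ?_
        · split <;> simp
        · intro x hx hy
          split at hx <;> simp_all [List.mem_filter]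
    rw [hperm.length_eq]
    simp only [List.length_append]
    have hmod : PySem.Int.mod (1 + (tw.length : Int)) 2
        = (if (a :: t).count a % 2 = 1 then 1 else 0 : Int) := by
      rw [hcount_a]
      simp only [PySem.Int.mod, Int.fmod_eq_emod]
      split <;> omega
    rw [← htw, hmod]
    split <;> simp

theorem pv_odd_eq (l : List Char) :
    (0 : Int) + ((((PySem.Set.ofList l).filter
        (fun i => !(PySem.Int.mod ((PySem.Dict.counter l).getD i 0) 2 == 0))).length : Nat) : Int)
    = pvOddRuns (PySem.List.sorted l (fun x => x) false) := by
  set sl := PySem.List.sorted l (fun x => x) false with hsl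
  have hperm : sl.Perm l := PySem.List.sorted_perm ..
  have hpair : sl.Pairwise (· ≤ ·) := by
    have := PySem.List.sorted_pairwise (xs := l) (key := fun x : Char => x)
    simpa using this
  rw [pv_scan_sorted sl hpair]
  have hfperm : ((PySem.Set.ofList l).filter
        (fun i => !(PySem.Int.mod ((PySem.Dict.counter l).getD i 0) 2 == 0))).Perm
      (sl.dedup.filter (fun x => decide (sl.count x % 2 = 1))) := by
    apply (List.perm_ext_iff_of_nodup
      (List.Nodup.filter _ (PySem.Set.nodup_ofList l))
      (List.Nodup.filter _ (List.nodup_dedup _))).mpr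
    intro x
    simp only [List.mem_filter, PySem.Set.mem_ofList, List.mem_dedup, decide_eq_true_eq,
      hperm.mem_iff, hperm.count_eq]
    have hc : PySem.Dict.getD (PySem.Dict.counter l) x 0 = (l.count x : Int) :=
      PySem.Dict.getD_counter ..
    simp only [hc, PySem.Int.mod, Int.fmod_eq_emod, Bool.not_eq_eq_eq_not, Bool.not_true,
      beq_eq_false_iff_ne]
    constructor
    · rintro ⟨hm, hne⟩; exact ⟨hm, by omega⟩
    · rintro ⟨hm, hne⟩; exact ⟨hm, by omega⟩
  rw [hfperm.length_eq]; omega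

-- ===== VERDICT (by name: the statement is the Claim_ definition above) =====
theorem checkDPS_spec : Claim_equal_checkDPS := by
  intro st _
  show checkDPS st = checkDPS_alt st
  unfold checkDPS checkDPS_alt
  simp only [PySem.Dict.keys_counter, pv_fold_odd, pv_odd_eq]
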